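-- pv_equiv track=rewrite | github.com/sung0471/Algorithm | programmers/coding-test-high-score-kit/stack-queue/1.py | solution
-- ===== SOURCE A (Python) =====
-- def solution(prices):
--     answer = []
--     for i in range(len(prices) - 1):    # 0 ~ len(prices)-2까지 순회
--         count = 0       # 상승하는 시간을 저장하는 변수
--         for j in range(i + 1, len(prices)):     # i+1 ~ len(prices)-1까지 순회
--             if prices[i] <= prices[j]:  # 가격이 상승하거나 같으면
--                 count += 1  # 상승하는 시간 +1
--             else:
--                 count += 1  # 상승하지 않지만, 감소하기 직전까지의 시간을 +1 해야함
--                 break       # 감소했으므로 종료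
--         answer += [count]   # 주식가격 하나의 상승시간을 저장
--
--     answer += [0]   # 맨 마지막의 주식가격은 0이므로, 0으로 저장
--     return answer
-- ===== SOURCE B (Python) =====
-- def solution(prices):
--     n = len(prices)
--     answer = [0] * n
--     stack = []      # indices whose drop has not been seen yet; prices non-decreasing bottom-to-top
--     for j in range(n):
--         p = prices[j]
--         while stack and prices[stack[-1]] > p:
--             i = stack.pop()
--             answer[i] = j - i
--         stack.append(j)
--     while stack:    # never dropped: stays until the end
--         i = stack.pop()
--         answer[i] = n - 1 - i
--     return answer
-- ===== Notes on version B (the rewrite author's own statement) =====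
-- stated objective: faster
-- what changed: Replaced the per-index rescan of the remaining list (nested loop with break) by a single left-to-right pass with a monotonic stack of unresolved indices, resolving each duration when the first lower price arrives.
-- intended difference: On the empty list A returns a one-element list holding a single zero (its unconditional trailing append emits one duration even for zero prices) while B returns the empty list, whose length matches the input's, which is the intended shape of the answer. — e.g. on solution([]): A returns [0], B returns []
import Mathlib
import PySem

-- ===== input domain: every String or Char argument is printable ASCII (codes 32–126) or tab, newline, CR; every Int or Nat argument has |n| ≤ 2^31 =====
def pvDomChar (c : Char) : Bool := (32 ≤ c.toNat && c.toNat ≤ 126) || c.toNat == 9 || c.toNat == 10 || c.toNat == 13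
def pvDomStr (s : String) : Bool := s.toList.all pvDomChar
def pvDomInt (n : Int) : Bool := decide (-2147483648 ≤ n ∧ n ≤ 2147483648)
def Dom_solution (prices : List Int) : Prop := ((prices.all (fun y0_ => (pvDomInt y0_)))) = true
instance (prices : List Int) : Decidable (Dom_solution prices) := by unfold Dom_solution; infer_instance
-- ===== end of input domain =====

-- B replaces A's per-index rescan (O(n^2)) by one pass with a monotonic stack of
-- unresolved indices (O(n)); the two agree except on the empty list (see D_ below).

-- ===== PORT A =====
-- inner loop of A: for j in range(i+1, n): count += 1; break on prices[j] < prices[i].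
-- All indices are in range by construction, so plain getD is exact here.
def innerA (prices : List Int) (pi : Int) : List Nat → Int → Int
  | [], count => count
  | j :: js, count =>
      if pi ≤ prices.getD j 0 then innerA prices pi js (count + 1) else count + 1

def solution (prices : List Int) : List Int :=
  ((List.range (prices.length - 1)).foldl
    (fun answer i =>
      answer ++ [innerA prices (prices.getD i 0) (List.range' (i + 1) (prices.length - (i + 1))) 0])
    []) ++ [0]

-- ===== PORT B =====
-- while stack and prices[stack[-1]] > p: i = stack.pop(); answer[i] = j - i
def popB (prices : List Int) (j : Nat) : List Nat → List Int → List Nat × List Int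
  | [], answer => ([], answer)
  | i :: st, answer =>
      if prices.getD i 0 > prices.getD j 0
      then popB prices j st (answer.set i ((j : Int) - (i : Int)))
      else (i :: st, answer)

-- while stack: i = stack.pop(); answer[i] = n - 1 - i
def drainB (n : Nat) : List Nat → List Int → List Int
  | [], answer => answer
  | i :: st, answer => drainB n st (answer.set i ((n : Int) - 1 - (i : Int)))

def solution_alt (prices : List Int) : List Int :=
  let s := (List.range prices.length).foldl
    (fun (s : List Int × List Nat) j =>
      let t := popB prices j s.2 s.1
      (t.2, j :: t.1))
    (List.replicate prices.length 0, [])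
  drainB prices.length s.2 s.1

-- ===== PRECONDITION & SPEC =====
-- On the empty list A returns a one-element list holding a single zero (its unconditional
-- trailing append emits one duration even for zero prices) while B returns the empty list,
-- whose length matches the input's, which is the intended shape of the answer.
def D_solution (prices : List Int) : Prop := prices = []
instance (prices : List Int) : Decidable (D_solution prices) := by unfold D_solution; infer_instance
def Spec_solution (prices : List Int) (out : List Int) : Prop := ¬ D_solution prices → out = solution_alt prices
instance (prices : List Int) (out : List Int) : Decidable (Spec_solution prices out) := by unfold Spec_solution; infer_instance
def pvDiffWitness_solution : List Int := []
def pvDiffWitnessOut_solution : (List Int) × (List Int) := ([0], [])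

-- ===== CLAIM (what is proved, stated in full; the proofs are below) =====
def Claim_unchanged_solution : Prop := ∀ (prices : List Int), Dom_solution prices → Spec_solution prices (solution prices)
def Claim_changed_solution : Prop := Dom_solution (pvDiffWitness_solution) ∧ D_solution (pvDiffWitness_solution) ∧ solution (pvDiffWitness_solution) = pvDiffWitnessOut_solution.1 ∧ solution_alt (pvDiffWitness_solution) = pvDiffWitnessOut_solution.2 ∧ pvDiffWitnessOut_solution.1 ≠ pvDiffWitnessOut_solution.2
def Claim_exact_solution : Prop := ∀ (prices : List Int), Dom_solution prices → D_solution prices → solution prices ≠ solution_alt prices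

-- ===== LEMMAS AND PROOFS =====

lemma getD_set_self (l : List Int) (i : Nat) (v : Int) (h : i < l.length) :
    (l.set i v).getD i 0 = v := by
  simp [List.getD_eq_getElem?_getD, h]

lemma getD_set_ne (l : List Int) (i i' : Nat) (v : Int) (h : i' ≠ i) :
    (l.set i v).getD i' 0 = l.getD i' 0 := by
  simp [List.getD_eq_getElem?_getD, List.getElem?_set_ne (by omega : i ≠ i')]

-- first index j in the list with prices[j] < pi (the "first drop")
def fd (p : List Int) (pi : Int) : List Nat → Option Nat
  | [] => none
  | j :: js => if p.getD j 0 < pi then some j else fd p pi js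

-- intended duration of index i: first drop j ↦ j - i, none ↦ n - 1 - i
def fval (p : List Int) (i : Nat) : Int :=
  match fd p (p.getD i 0) (List.range' (i + 1) (p.length - (i + 1))) with
  | some j => (j : Int) - (i : Int)
  | none => (p.length : Int) - 1 - (i : Int)

lemma fd_eq_none (p : List Int) (pi : Int) :
    ∀ (len a : Nat), (∀ j, a ≤ j → j < a + len → ¬ (p.getD j 0 < pi)) →
      fd p pi (List.range' a len) = none := by
  intro len
  induction len with
  | zero => intro a _; simp [fd]
  | succ m ih =>
      intro a h
      rw [List.range'_succ]
      simp only [fd]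
      rw [if_neg (h a (le_refl a) (by omega))]
      exact ih (a + 1) (fun j h1 h2 => h j (by omega) (by omega))

lemma fd_eq_some (p : List Int) (pi : Int) :
    ∀ (len a j : Nat), a ≤ j → j < a + len → p.getD j 0 < pi →
      (∀ k, a ≤ k → k < j → ¬ (p.getD k 0 < pi)) →
      fd p pi (List.range' a len) = some j := by
  intro len
  induction len with
  | zero => intro a j h1 h2; omega
  | succ m ih =>
      intro a j h1 h2 h3 h4
      rw [List.range'_succ]
      simp only [fd]
      by_cases hc : a = j
      · subst hc; rw [if_pos h3]
      · rw [if_neg (h4 a (le_refl a) (by omega))]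
        exact ih (a + 1) j (by omega) (by omega) h3
          (fun k hk1 hk2 => h4 k (by omega) hk2)

lemma innerA_eq (p : List Int) (pi : Int) :
    ∀ (len a : Nat) (c : Int), innerA p pi (List.range' a len) c =
      (match fd p pi (List.range' a len) with
       | some j => c + ((j : Int) - (a : Int) + 1)
       | none => c + (len : Int)) := by
  intro len
  induction len with
  | zero => intro a c; simp [fd, innerA]
  | succ m ih =>
      intro a c
      rw [List.range'_succ]
      simp only [fd, innerA]
      by_cases hc : p.getD a 0 < pi
      · rw [if_pos hc, if_neg (by omega)]
        simp
      · rw [if_neg hc, if_pos (by omega)]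
        rw [ih (a + 1) (c + 1)]
        cases h : fd p pi (List.range' (a + 1) m) with
        | none => simp; ring
        | some j => simp; ring

lemma foldl_app {α : Type} (w : Nat → α) :
    ∀ (L : List Nat) (acc : List α),
      L.foldl (fun ans i => ans ++ [w i]) acc = acc ++ L.map w := by
  intro L
  induction L with
  | nil => intro acc; simp
  | cons x xs ih => intro acc; simp [ih]

lemma fval_last (p : List Int) (h : p ≠ []) : fval p (p.length - 1) = 0 := by
  have hn : 1 ≤ p.length := List.length_pos_iff.mpr h
  unfold fval
  have : p.length - (p.length - 1 + 1) = 0 := by omega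
  rw [this]
  simp only [List.range']
  simp [fd]
  omega

lemma innerA_fval (p : List Int) (i : Nat) (hi : i < p.length) :
    innerA p (p.getD i 0) (List.range' (i + 1) (p.length - (i + 1))) 0 = fval p i := by
  rw [innerA_eq]
  unfold fval
  cases h : fd p (p.getD i 0) (List.range' (i + 1) (p.length - (i + 1))) with
  | none =>
      simp
      rw [Nat.cast_sub (by omega : i + 1 ≤ p.length)]
      push_cast
      ring
  | some j => simp; ring

lemma A_eq (p : List Int) (h : p ≠ []) :
    solution p = (List.range p.length).map (fval p) := by
  have hn : 1 ≤ p.length := List.length_pos_iff.mpr h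
  unfold solution
  rw [foldl_app]
  have hrange : List.range p.length = List.range (p.length - 1) ++ [p.length - 1] := by
    conv_lhs => rw [(by omega : p.length = (p.length - 1) + 1)]
    rw [List.range_succ]
  rw [hrange]
  simp only [List.map_append, List.map_cons, List.map_nil]
  congr 1
  · apply List.map_congr_left
    intro i hi
    have : i < p.length := by
      rw [List.mem_range] at hi; omega
    exact innerA_fval p i this
  · rw [fval_last p h]

def StInv (p : List Int) (j : Nat) (ans : List Int) (st : List Nat) : Prop :=
  ans.length = p.length ∧
  (∀ i ∈ st, i < j) ∧
  List.Pairwise (fun a b => b < a) st ∧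
  (∀ i, i < j → (i ∈ st ↔ ∀ k, i < k → k < j → p.getD i 0 ≤ p.getD k 0)) ∧
  (∀ i, i < j → i ∉ st → ans.getD i 0 = fval p i)

lemma popB_spec (p : List Int) (j : Nat) :
    ∀ (st : List Nat) (ans : List Int),
      (∀ i ∈ st, i < j) → List.Pairwise (fun a b => b < a) st →
      (∀ i' i, i' ∈ st → i ∈ st → i' < i → p.getD i' 0 ≤ p.getD i 0) →
      j < ans.length →
      ∃ popped, st = popped ++ (popB p j st ans).1 ∧
        (∀ i ∈ popped, p.getD j 0 < p.getD i 0) ∧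
        (∀ i ∈ (popB p j st ans).1, p.getD i 0 ≤ p.getD j 0) ∧
        (popB p j st ans).2.length = ans.length ∧
        (∀ i ∈ popped, (popB p j st ans).2.getD i 0 = (j : Int) - (i : Int)) ∧
        (∀ i : Nat, i ∉ popped → (popB p j st ans).2.getD i 0 = ans.getD i 0) := by
  intro st
  induction st with
  | nil =>
      intro ans _ _ _ _
      exact ⟨[], by simp [popB], by simp, by simp [popB], by simp [popB], by simp, by simp [popB]⟩
  | cons i st ih =>
      intro ans hlt hpw hmono hj
      obtain ⟨hi_st, hpw'⟩ := List.pairwise_cons.mp hpw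
      by_cases hc : p.getD i 0 > p.getD j 0
      · simp only [popB, if_pos hc]
        have hilen : i < ans.length := lt_trans (hlt i (by simp)) hj
        obtain ⟨popped, e1, e2, e3, e4, e5, e6⟩ :=
          ih (ans.set i ((j : Int) - (i : Int)))
            (fun i' h' => hlt i' (List.mem_cons_of_mem _ h'))
            hpw'
            (fun i' i'' h1 h2 h3 =>
              hmono i' i'' (List.mem_cons_of_mem _ h1) (List.mem_cons_of_mem _ h2) h3)
            (by rw [List.length_set]; exact hj)
        have hinotst : i ∉ st := fun hmem => lt_irrefl i (hi_st i hmem)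
        have hinotpopped : i ∉ popped := fun hmem =>
          hinotst (e1 ▸ List.mem_append_left _ hmem)
        refine ⟨i :: popped, ?_, ?_, e3, ?_, ?_, ?_⟩
        · rw [List.cons_append, ← e1]
        · intro i' hi'
          rcases List.mem_cons.mp hi' with h | h
          · subst h; exact hc
          · exact e2 i' h
        · rw [e4, List.length_set]
        · intro i' hi'
          rcases List.mem_cons.mp hi' with h | h
          · subst h
            rw [e6 i' hinotpopped, getD_set_self _ _ _ hilen]
          · exact e5 i' h
        · intro i' hi'
          have h1 : i' ≠ i := fun e => hi' (e ▸ List.mem_cons_self)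
          have h2 : i' ∉ popped := fun e => hi' (List.mem_cons_of_mem _ e)
          rw [e6 i' h2, getD_set_ne _ _ _ _ h1]
      · simp only [popB, if_neg hc]
        refine ⟨[], by simp, by simp, ?_, by simp, by simp, by simp⟩
        intro i' hi'
        rcases List.mem_cons.mp hi' with h | h
        · subst h; omega
        · exact le_trans
            (hmono i' i (List.mem_cons_of_mem _ h) List.mem_cons_self (hi_st i' h))
            (by omega)

lemma step_spec (p : List Int) (j : Nat) (hj : j < p.length) (ans : List Int) (st : List Nat)
    (hInv : StInv p j ans st) :
    StInv p (j + 1) (popB p j st ans).2 (j :: (popB p j st ans).1) := by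
  obtain ⟨hlen, hbnd, hpw, hmem, hres⟩ := hInv
  have hmono : ∀ i' i, i' ∈ st → i ∈ st → i' < i → p.getD i' 0 ≤ p.getD i 0 := by
    intro i' i h1 h2 h3
    exact ((hmem i' (lt_trans h3 (hbnd i h2))).mp h1) i h3 (hbnd i h2)
  obtain ⟨popped, e1, e2, e3, e4, e5, e6⟩ :=
    popB_spec p j st ans hbnd hpw hmono (hlen ▸ hj)
  have hsub : ∀ i ∈ (popB p j st ans).1, i ∈ st := by
    intro i h; rw [e1]; exact List.mem_append_right _ h
  have hpsub : ∀ i ∈ popped, i ∈ st := by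
    intro i h; rw [e1]; exact List.mem_append_left _ h
  refine ⟨e4.trans hlen, ?_, ?_, ?_, ?_⟩
  · intro i hi
    rcases List.mem_cons.mp hi with h | h
    · omega
    · exact lt_trans (hbnd i (hsub i h)) (by omega)
  · rw [List.pairwise_cons]
    exact ⟨fun i h => hbnd i (hsub i h),
      (List.pairwise_append.mp (e1 ▸ hpw)).2.1⟩
  · intro i hij
    constructor
    · intro hi k hk1 hk2
      rcases List.mem_cons.mp hi with h | h
      · omega
      · have hist : i ∈ st := hsub i h
        by_cases hkj : k = j
        · subst hkj; exact e3 i h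
        · exact (hmem i (hbnd i hist)).mp hist k hk1 (by omega)
    · intro hcond
      by_cases hij' : i = j
      · subst hij'; exact List.mem_cons_self
      · have hiltj : i < j := by omega
        have hist : i ∈ st := (hmem i hiltj).mpr
          (fun k h1 h2 => hcond k h1 (by omega))
        rcases List.mem_append.mp (e1 ▸ hist) with h | h
        · exact absurd (hcond j hiltj (by omega)) (by have := e2 i h; omega)
        · exact List.mem_cons_of_mem _ h
  · intro i hij hnot
    have hij' : i ≠ j := fun e => hnot (e ▸ List.mem_cons_self)
    have hiltj : i < j := by omega
    have hnst' : i ∉ (popB p j st ans).1 := fun h => hnot (List.mem_cons_of_mem _ h)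
    by_cases hist : i ∈ st
    · have hpop : i ∈ popped := by
        rcases List.mem_append.mp (e1 ▸ hist) with h | h
        · exact h
        · exact absurd h hnst'
      rw [e5 i hpop]
      unfold fval
      rw [fd_eq_some p (p.getD i 0) (p.length - (i + 1)) (i + 1) j
        (by omega) (by omega) (e2 i hpop)
        (fun k h1 h2 => by
          have := (hmem i hiltj).mp hist k (by omega) (by omega)
          omega)]
    · have hnpop : i ∉ popped := fun h => hist (hpsub i h)
      rw [e6 i hnpop]
      exact hres i hiltj hist

lemma fold_inv (p : List Int) :
    ∀ j, j ≤ p.length →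
      StInv p j ((List.range j).foldl
        (fun (s : List Int × List Nat) j =>
          let t := popB p j s.2 s.1
          (t.2, j :: t.1)) (List.replicate p.length 0, [])).1
        ((List.range j).foldl
        (fun (s : List Int × List Nat) j =>
          let t := popB p j s.2 s.1
          (t.2, j :: t.1)) (List.replicate p.length 0, [])).2 := by
  intro j
  induction j with
  | zero =>
      intro _
      refine ⟨by simp, by simp, by simp, ?_, ?_⟩
      · intro i hi; omega
      · intro i hi; omega
  | succ m ih =>
      intro h
      rw [List.range_succ, List.foldl_append, List.foldl_cons, List.foldl_nil]
      exact step_spec p m (by omega) _ _ (ih (by omega))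

lemma drain_spec (p : List Int) :
    ∀ (st : List Nat) (ans : List Int),
      ans.length = p.length → (∀ i ∈ st, i < p.length) →
      List.Pairwise (fun a b => b < a) st →
      (∀ i ∈ st, fval p i = (p.length : Int) - 1 - (i : Int)) →
      (∀ i, i < p.length → i ∉ st → ans.getD i 0 = fval p i) →
      drainB p.length st ans = (List.range p.length).map (fval p) := by
  intro st
  induction st with
  | nil =>
      intro ans hlen _ _ _ hres
      show ans = (List.range p.length).map (fval p)
      apply List.ext_getElem
      · simp [hlen]
      · intro i h1 h2
        have hin : i < p.length := hlen ▸ h1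
        have := hres i hin List.not_mem_nil
        rw [List.getD_eq_getElem _ _ h1] at this
        simpa using this
  | cons i st ih =>
      intro ans hlen hbnd hpw hfv hres
      obtain ⟨hi_st, hpw'⟩ := List.pairwise_cons.mp hpw
      show drainB p.length st (ans.set i ((p.length : Int) - 1 - (i : Int))) =
        (List.range p.length).map (fval p)
      apply ih
      · rw [List.length_set]; exact hlen
      · exact fun i' h => hbnd i' (List.mem_cons_of_mem _ h)
      · exact hpw'
      · exact fun i' h => hfv i' (List.mem_cons_of_mem _ h)
      · intro i' hi' hnot
        by_cases hc : i' = i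
        · subst hc
          rw [getD_set_self _ _ _ (hlen ▸ hbnd i' List.mem_cons_self)]
          exact (hfv i' List.mem_cons_self).symm
        · rw [getD_set_ne _ _ _ _ hc]
          exact hres i' hi' (fun h => by
            rcases List.mem_cons.mp h with h' | h'
            · exact hc h'
            · exact hnot h')

lemma B_eq (p : List Int) :
    solution_alt p = (List.range p.length).map (fval p) := by
  obtain ⟨hlen, hbnd, hpw, hmem, hres⟩ := fold_inv p p.length (le_refl _)
  exact drain_spec p _ _ hlen hbnd hpw
    (fun i hi => by
      unfold fval
      rw [fd_eq_none p (p.getD i 0) (p.length - (i + 1)) (i + 1)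
        (fun j h1 h2 => by
          have := (hmem i (hbnd i hi)).mp hi j (by omega) (by omega)
          omega)])
    hres

-- ===== VERDICT (by name: the statement is the Claim_ definition above) =====
theorem solution_spec : Claim_unchanged_solution := by
  intro prices _ h
  have hne : prices ≠ [] := fun e => h e
  show solution prices = solution_alt prices
  rw [A_eq prices hne, B_eq prices]

theorem solution_changed : Claim_changed_solution := by
  unfold Claim_changed_solution; decide

theorem solution_tight : Claim_exact_solution := by
  intro prices _ hD
  subst hD
  decide
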